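-- pv_equiv track=rewrite | github.com/sudheerbatthina/Clinical-RAG-assistant | rag_assistant/chunker.py | _split_at_paragraphs
-- ===== SOURCE A (Python) =====
-- def _split_at_paragraphs(text: str, max_size: int) -> list[str]:
--     """Split text at paragraph boundaries, keeping parts under max_size."""
--     parts = []
--     current = ""
--
--     for para in text.split("\n\n"):
--         if not current:
--             current = para
--         elif len(current) + 2 + len(para) <= max_size:
--             current += "\n\n" + para
--         else:
--             parts.append(current)
--             current = para
--     if current:
--         parts.append(current)
--
--     # Second pass: if any part still exceeds max_size, split at newlines
--     final = []
--     for part in parts: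
--         if len(part) <= max_size:
--             final.append(part)
--         else:
--             curr = ""
--             for line in part.split("\n"):
--                 if not curr:
--                     curr = line
--                 elif len(curr) + 1 + len(line) <= max_size:
--                     curr += "\n" + line
--                 else:
--                     final.append(curr)
--                     curr = line
--             if curr:
--                 final.append(curr)
--
--     return [p for p in final if p.strip()]
-- ===== SOURCE B (Python) =====
-- def _split_at_paragraphs(text: str, max_size: int) -> list[str]:
--     """Split text at paragraph boundaries, keeping parts under max_size.
--
--     Recursive separator-hierarchy version: one greedy grouper applied
--     along the separator list ["\n\n", "\n"], recursing on oversized chunks.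
--     """
--
--     def split(s: str, seps: list[str]) -> list[str]:
--         sep, rest = seps[0], seps[1:]
--         out: list[str] = []
--         current = ""
--
--         def emit(chunk: str) -> None:
--             if len(chunk) > max_size and rest:
--                 out.extend(split(chunk, rest))
--             else:
--                 out.append(chunk)
--
--         for piece in s.split(sep):
--             if not current:
--                 current = piece
--             elif len(current) + len(sep) + len(piece) <= max_size:
--                 current += sep + piece
--             else:
--                 emit(current)
--                 current = piece
--         if current:
--             emit(current)
--         return out
--
--     return [p for p in split(text, ["\n\n", "\n"]) if p.strip()]
-- ===== Notes on version B (the rewrite author's own statement) =====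
-- stated objective: idiomatic
-- what changed: A's two hand-unrolled greedy passes (paragraph grouping, then re-splitting oversized parts at newlines) are replaced by one recursive separator-hierarchy splitter driven by the list ["\n\n", "\n"], which greedily groups on the current separator and recurses on a finished chunk only while it exceeds max_size and separators remain.
import Mathlib
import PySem

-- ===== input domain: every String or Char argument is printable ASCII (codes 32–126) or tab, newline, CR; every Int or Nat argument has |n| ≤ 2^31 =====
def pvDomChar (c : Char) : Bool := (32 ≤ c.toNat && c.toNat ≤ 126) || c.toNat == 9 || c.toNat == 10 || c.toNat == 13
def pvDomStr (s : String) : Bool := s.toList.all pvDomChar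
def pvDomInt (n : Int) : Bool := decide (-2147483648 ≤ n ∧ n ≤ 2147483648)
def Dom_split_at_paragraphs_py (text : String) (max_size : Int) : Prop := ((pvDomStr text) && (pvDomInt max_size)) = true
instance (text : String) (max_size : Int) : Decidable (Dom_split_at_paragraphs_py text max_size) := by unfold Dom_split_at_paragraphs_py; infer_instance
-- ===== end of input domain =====

-- B rewrites A's two hand-unrolled greedy passes as ONE recursive separator-hierarchy
-- splitter over the list ["\n\n", "\n"] (objective: idiomatic/alternative decomposition,
-- same asymptotic cost); return values are proved identical on all inputs.

-- ===== PORT A =====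
def split_at_paragraphs_py (text : String) (max_size : Int) : List String :=
  -- first pass: greedy grouping of paragraphs
  let p := ((PySem.Str.split? text "\n\n").getD []).foldl
    (fun (st : List String × String) para =>
      if st.2 = "" then (st.1, para)
      else if (st.2.length : Int) + 2 + (para.length : Int) ≤ max_size then (st.1, st.2 ++ "\n\n" ++ para)
      else (st.1 ++ [st.2], para)) ([], "")
  let parts := if p.2 = "" then p.1 else p.1 ++ [p.2]
  -- second pass: oversized parts are re-split at single newlines
  let final := parts.foldl
    (fun (final : List String) part =>
      if (part.length : Int) ≤ max_size then final ++ [part]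
      else
        let q := ((PySem.Str.split? part "\n").getD []).foldl
          (fun (st : List String × String) line =>
            if st.2 = "" then (st.1, line)
            else if (st.2.length : Int) + 1 + (line.length : Int) ≤ max_size then (st.1, st.2 ++ "\n" ++ line)
            else (st.1 ++ [st.2], line)) ([], "")
        (if q.2 = "" then final ++ q.1 else final ++ (q.1 ++ [q.2]))) []
  final.filter (fun s => PySem.Str.strip s != "")

-- ===== PORT B =====
-- Source B's recursive helper `split(s, seps)` (structural recursion on the separator list;
-- the `[]` case is unreachable from the top-level call and only makes the function total)
def pvAltSplit (max_size : Int) : List String → String → List String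
  | [], s => [s]
  | sep :: rest, s =>
    let emit : String → List String := fun chunk =>
      if (chunk.length : Int) > max_size ∧ rest ≠ [] then pvAltSplit max_size rest chunk
      else [chunk]
    let fin := ((PySem.Str.split? s sep).getD []).foldl
      (fun (st : List String × String) piece =>
        if st.2 = "" then (st.1, piece)
        else if (st.2.length : Int) + (sep.length : Int) + (piece.length : Int) ≤ max_size then
          (st.1, st.2 ++ sep ++ piece)
        else (st.1 ++ emit st.2, piece)) ([], "")
    if fin.2 = "" then fin.1 else fin.1 ++ emit fin.2

def split_at_paragraphs_py_alt (text : String) (max_size : Int) : List String :=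
  (pvAltSplit max_size ["\n\n", "\n"] text).filter (fun s => PySem.Str.strip s != "")

-- ===== PRECONDITION & SPEC =====
def Spec_split_at_paragraphs_py (text : String) (max_size : Int) (out : List String) : Prop := out = split_at_paragraphs_py_alt text max_size
instance (text : String) (max_size : Int) (out : List String) : Decidable (Spec_split_at_paragraphs_py text max_size out) := by unfold Spec_split_at_paragraphs_py; infer_instance

-- ===== CLAIM (what is proved, stated in full; the proofs are below) =====
def Claim_equal_split_at_paragraphs_py : Prop := ∀ (text : String) (max_size : Int), Dom_split_at_paragraphs_py text max_size → Spec_split_at_paragraphs_py text max_size (split_at_paragraphs_py text max_size)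

-- ===== LEMMAS AND PROOFS =====

-- the shared greedy-grouping step, parameterised by what is done with a finished chunk
def pvStep (m : Int) (sep : String) (emit : String → List String) :
    List String × String → String → List String × String :=
  fun st piece =>
    if st.2 = "" then (st.1, piece)
    else if (st.2.length : Int) + (sep.length : Int) + (piece.length : Int) ≤ m then
      (st.1, st.2 ++ sep ++ piece)
    else (st.1 ++ emit st.2, piece)

def pvFin (emit : String → List String) (st : List String × String) : List String :=
  if st.2 = "" then st.1 else st.1 ++ emit st.2

-- interleaved emission = collect plain chunks first, then emit each (flatMap)
theorem pv_greedy_flatMap (m : Int) (sep : String) (emit : String → List String)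
    (pieces : List String) (os ps : List String) (cur : String)
    (h : os = ps.flatMap emit) :
    pvFin emit (pieces.foldl (pvStep m sep emit) (os, cur))
      = (pvFin (fun c => [c]) (pieces.foldl (pvStep m sep (fun c => [c])) (ps, cur))).flatMap emit := by
  induction pieces generalizing os ps cur with
  | nil =>
    simp only [List.foldl_nil, pvFin]
    split_ifs <;> simp [h]
  | cons pc t ih =>
    simp only [List.foldl_cons, pvStep]
    split_ifs
    · exact ih _ _ _ h
    · exact ih _ _ _ h
    · exact ih _ _ _ (by simp [h])

theorem pv_foldl_append_flatMap {α β : Type} (g : α → List β) (l : List α) (acc : List β) :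
    l.foldl (fun acc x => acc ++ g x) acc = acc ++ l.flatMap g := by
  induction l generalizing acc with
  | nil => simp
  | cons x t ih => simp [ih, List.append_assoc]

-- ===== VERDICT (by name: the statement is the Claim_ definition above) =====
theorem split_at_paragraphs_py_spec : Claim_equal_split_at_paragraphs_py := by
  intro text m _
  show split_at_paragraphs_py text m = split_at_paragraphs_py_alt text m
  unfold split_at_paragraphs_py split_at_paragraphs_py_alt pvAltSplit
  -- name the three emit functions
  set emitB : String → List String := fun chunk =>
    if (chunk.length : Int) > m ∧ (["\n"] : List String) ≠ [] then pvAltSplit m ["\n"] chunk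
    else [chunk] with hemitB
  -- A's inner (line-level) split equals pvAltSplit m ["\n"]
  have hInner : ∀ part : String,
      pvAltSplit m ["\n"] part
        = pvFin (fun c => [c])
            (((PySem.Str.split? part "\n").getD []).foldl (pvStep m "\n" (fun c => [c])) ([], "")) := by
    intro part
    unfold pvAltSplit
    simp only [ne_eq, not_true_eq_false, and_false, if_false, pvFin]
    rfl
  -- A's second-pass body as emitB
  have hG : (fun part : String =>
      if (part.length : Int) ≤ m then [part]
      else pvFin (fun c => [c])
            (((PySem.Str.split? part "\n").getD []).foldl (pvStep m "\n" (fun c => [c])) ([], ""))) = emitB := by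
    funext part
    rw [hemitB]
    by_cases hle : (part.length : Int) ≤ m
    · simp [hle, not_lt.mpr hle]
    · simp [hle, lt_of_not_ge hle, hInner part]
  -- A's fold steps are pvStep instances
  have hA1 : (fun (st : List String × String) para =>
      if st.2 = "" then (st.1, para)
      else if (st.2.length : Int) + 2 + (para.length : Int) ≤ m then (st.1, st.2 ++ "\n\n" ++ para)
      else (st.1 ++ [st.2], para)) = pvStep m "\n\n" (fun c => [c]) := by
    funext st para
    have h2 : ((("\n\n" : String).length : Int)) = 2 := by decide
    simp [pvStep, h2]
  have hA2 : ∀ part : String, (fun (st : List String × String) line =>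
      if st.2 = "" then (st.1, line)
      else if (st.2.length : Int) + 1 + (line.length : Int) ≤ m then (st.1, st.2 ++ "\n" ++ line)
      else (st.1 ++ [st.2], line)) = pvStep m "\n" (fun c => [c]) := by
    intro _
    funext st line
    have h1 : ((("\n" : String).length : Int)) = 1 := by decide
    simp [pvStep, h1]
  -- rewrite A into flatMap form
  simp only [hA1, hA2 ""]
  congr 1
  -- goal: A's `final` list = pvFin emitB (fold with emitB)
  have hfoldA : ∀ (parts : List String),
      parts.foldl
        (fun (final : List String) part =>
          if (part.length : Int) ≤ m then final ++ [part]
          else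
            let q := ((PySem.Str.split? part "\n").getD []).foldl (pvStep m "\n" (fun c => [c])) ([], "")
            (if q.2 = "" then final ++ q.1 else final ++ (q.1 ++ [q.2]))) []
        = parts.flatMap emitB := by
    intro parts
    have hbody : (fun (final : List String) part =>
        if (part.length : Int) ≤ m then final ++ [part]
        else
          let q := ((PySem.Str.split? part "\n").getD []).foldl (pvStep m "\n" (fun c => [c])) ([], "")
          (if q.2 = "" then final ++ q.1 else final ++ (q.1 ++ [q.2])))
        = (fun (final : List String) part => final ++ emitB part) := by
      funext final part
      rw [← hG]
      by_cases hle : (part.length : Int) ≤ m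
      · simp [hle]
      · simp only [hle, if_false]
        split_ifs <;> simp [pvFin, *]
    rw [hbody]
    simpa using pv_foldl_append_flatMap emitB parts []
  rw [hfoldA]
  -- both sides now: plainfold flatMap emitB = pvFin emitB (fold with emitB)
  have := pv_greedy_flatMap m "\n\n" emitB ((PySem.Str.split? text "\n\n").getD []) [] [] "" (by simp)
  -- B side in goal is literally pvFin emitB / pvStep emitB after folding defs
  simpa [pvStep, pvFin] using this.symm
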